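-- pv_equiv track=rewrite | github.com/seokhohong/mahjong-ai-medium | src/core/tenpai.py | _can_form_melds_optimized
-- ===== SOURCE A (Python) =====
-- from typing import List, Dict, Tuple, Set, Any
--
-- _meld_cache: Dict[Tuple[Tuple[int, ...], int], bool] = {}
--
-- def _can_form_melds_optimized(counts: List[int], num_melds: int) -> bool:
--     """Optimized meld checking with better pruning"""
--     if num_melds == 0:
--         return all(c == 0 for c in counts)
--
--     # Check cache
--     cache_key = (tuple(counts), num_melds)
--     if cache_key in _meld_cache:
--         return _meld_cache[cache_key]
--
--     counts = list(counts)  # Make a copy for modification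
--
--     # Process honors first - they can only form triplets
--     for i in range(27, 34):
--         if counts[i] % 3 != 0:
--             _meld_cache[cache_key] = False
--             return False
--         num_melds -= counts[i] // 3
--         counts[i] = 0
--
--     if num_melds <= 0:
--         result = num_melds == 0 and all(c == 0 for c in counts[:27])
--         _meld_cache[cache_key] = result
--         return result
--
--     # Try to form melds with number tiles
--     def solve_suit(start_idx: int, end_idx: int, remaining_melds: int) -> bool:
--         if remaining_melds == 0:
--             return all(counts[i] == 0 for i in range(start_idx, end_idx))
--
--         for i in range(start_idx, end_idx):
--             if counts[i] == 0:
--                 continue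
--
--             # Try triplet
--             if counts[i] >= 3:
--                 counts[i] -= 3
--                 if solve_suit(start_idx, end_idx, remaining_melds - 1):
--                     counts[i] += 3
--                     return True
--                 counts[i] += 3
--
--             # Try sequence (only valid for tiles 1-7 in suit)
--             if i % 9 <= 6 and i + 2 < end_idx and counts[i] > 0 and counts[i+1] > 0 and counts[i+2] > 0:
--                 counts[i] -= 1
--                 counts[i+1] -= 1
--                 counts[i+2] -= 1
--                 if solve_suit(start_idx, end_idx, remaining_melds - 1):
--                     counts[i] += 1
--                     counts[i+1] += 1
--                     counts[i+2] += 1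
--                     return True
--                 counts[i] += 1
--                 counts[i+1] += 1
--                 counts[i+2] += 1
--
--             # Can't use this tile
--             return False
--
--         return remaining_melds == 0
--
--     # Process each suit independently
--     for suit_start in [0, 9, 18]:
--         suit_tiles = sum(counts[suit_start:suit_start+9])
--         if suit_tiles % 3 != 0:
--             _meld_cache[cache_key] = False
--             return False
--
--         suit_melds = suit_tiles // 3
--         if suit_melds > 0:
--             if not solve_suit(suit_start, suit_start + 9, suit_melds):
--                 _meld_cache[cache_key] = False
--                 return False
--
--             num_melds -= suit_melds
--             for i in range(suit_start, suit_start + 9):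
--                 counts[i] = 0
--
--     result = num_melds == 0
--
--     # Cache the result (limit cache size)
--     if len(_meld_cache) < 50000:
--         _meld_cache[cache_key] = result
--
--     return result
-- ===== SOURCE B (Python) =====
-- # B: counter-free re-implementation. A threads a remaining-meld counter through a
-- # backtracking search per suit and updates num_melds sequentially; B instead checks the
-- # honor/suit divisibility conditions up front, compares num_melds against the closed-form
-- # total sum(t // 3), and decides each suit with a counter-free head-consuming
-- # decomposition of the 9-tile slice (no meld counter, no cache).
--
-- def _seq_ok(c, rest):
--     return len(rest) >= 2 and c > 0 and rest[0] > 0 and rest[1] > 0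
--
-- def _seq_next(c, rest):
--     return [c - 1, rest[0] - 1, rest[1] - 1] + rest[2:]
--
-- def _decompose(suit):
--     if not suit:
--         return True
--     c, rest = suit[0], suit[1:]
--     if c == 0:
--         return _decompose(rest)
--     if c >= 3:
--         if _decompose([c - 3] + rest):
--             return True
--         return _decompose(_seq_next(c, rest)) if _seq_ok(c, rest) else False
--     return _decompose(_seq_next(c, rest)) if _seq_ok(c, rest) else False
--
-- def _can_form_melds_optimized(counts, num_melds):
--     if num_melds == 0:
--         return all(c == 0 for c in counts)
--     if any(counts[i] % 3 != 0 for i in range(27, 34)):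
--         return False
--     melds = num_melds - sum(counts[i] // 3 for i in range(27, 34))
--     if melds <= 0:
--         return melds == 0 and all(c == 0 for c in counts[:27])
--     suits = [[counts[s + k] for k in range(9)] for s in (0, 9, 18)]
--     if any(sum(su) % 3 != 0 for su in suits):
--         return False
--     if melds != sum(sum(su) // 3 for su in suits if sum(su) > 0):
--         return False
--     return all(sum(su) <= 0 or _decompose(su) for su in suits)
-- ===== Notes on version B (the rewrite author's own statement) =====
-- stated objective: simpler
-- what changed: B drops A's remaining-meld counter, memo cache and sequential num_melds mutation: honors and per-suit divisibility are checked up front with short-circuiting scans, num_melds is compared against the closed-form sum of the positive suit_tiles//3, and each suit is decided by a counter-free head-consuming recursive decomposition instead of A's index-loop backtracking threaded with a meld counter.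
import Mathlib
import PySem

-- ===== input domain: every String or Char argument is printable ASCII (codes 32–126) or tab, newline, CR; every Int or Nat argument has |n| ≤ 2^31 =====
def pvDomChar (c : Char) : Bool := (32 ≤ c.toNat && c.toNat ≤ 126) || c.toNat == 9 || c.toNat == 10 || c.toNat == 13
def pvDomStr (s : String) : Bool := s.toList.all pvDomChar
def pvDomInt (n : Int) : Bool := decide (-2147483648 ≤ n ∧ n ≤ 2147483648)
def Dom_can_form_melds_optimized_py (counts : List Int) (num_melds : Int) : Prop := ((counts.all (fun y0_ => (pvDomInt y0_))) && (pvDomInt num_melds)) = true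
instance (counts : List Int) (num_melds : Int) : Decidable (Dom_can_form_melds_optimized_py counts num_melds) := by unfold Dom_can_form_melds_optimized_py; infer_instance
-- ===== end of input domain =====

-- B replaces A's meld-counter-threaded backtracking and sequential suit loop by a counter-free
-- head-consuming suit decomposition plus closed-form meld arithmetic (objective: simpler).
-- A's module-level memo cache and its in-place zeroing of honors/finished suits are pure
-- bookkeeping (the zeroed entries are never read again) and do not affect the return value.
-- ===== PORT A =====
-- honors pass
def honorsLoopA (counts : List Int) : List Nat → Int → Option Int
  | [], m => some m
  | i :: is, m =>
    let c := counts.getD i 0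
    if PySem.Int.mod c 3 ≠ 0 then none
    else honorsLoopA counts is (m - PySem.Int.floordiv c 3)

mutual
def solveSuitA (fuel : Nat) (counts : List Int) (s e : Nat) (remaining : Int) : Bool :=
  match fuel with
  | 0 => false
  | f + 1 =>
    if remaining = 0 then (List.range' s (e - s)).all (fun i => counts.getD i 0 == 0)
    else solveLoopA f counts s e remaining s
termination_by (fuel, 0, 0)

def solveLoopA (f : Nat) (counts : List Int) (s e : Nat) (remaining : Int) (i : Nat) : Bool :=
  if h : i < e then
    let c := counts.getD i 0
    if c = 0 then solveLoopA f counts s e remaining (i + 1)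
    else if 3 ≤ c then
      if solveSuitA f (counts.set i (c - 3)) s e (remaining - 1) then true
      else solveSeqA f counts s e remaining i
    else solveSeqA f counts s e remaining i
  else decide (remaining = 0)
termination_by (f, 1, e - i)

def solveSeqA (f : Nat) (counts : List Int) (s e : Nat) (remaining : Int) (i : Nat) : Bool :=
  let c := counts.getD i 0
  if i % 9 ≤ 6 ∧ i + 2 < e ∧ 0 < c ∧ 0 < counts.getD (i + 1) 0 ∧ 0 < counts.getD (i + 2) 0 then
    solveSuitA f (((counts.set i (c - 1)).set (i + 1) (counts.getD (i + 1) 0 - 1)).set (i + 2)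
        (counts.getD (i + 2) 0 - 1)) s e (remaining - 1)
  else false
termination_by (f, 1, 0)
end

def suitsLoopA (counts : List Int) : List Nat → Int → Bool
  | [], m => decide (m = 0)
  | s :: ss, m =>
    let t := (PySem.List.slice counts (some (s : Int)) (some ((s + 9 : Nat) : Int))).sum
    if PySem.Int.mod t 3 ≠ 0 then false
    else
      let sm := PySem.Int.floordiv t 3
      if 0 < sm then
        if solveSuitA (sm.toNat + 1) counts s (s + 9) sm then suitsLoopA counts ss (m - sm)
        else false
      else suitsLoopA counts ss m

def can_form_melds_optimized_py (counts : List Int) (num_melds : Int) : Bool :=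
  if num_melds = 0 then counts.all (fun c => c == 0)
  else
    -- early 'return False' from the honors loop propagates as `none`
    (honorsLoopA counts [27, 28, 29, 30, 31, 32, 33] num_melds).elim false (fun m1 =>
      if m1 ≤ 0 then decide (m1 = 0) && (PySem.List.slice counts none (some ((27 : Nat) : Int))).all (fun c => c == 0)
      else suitsLoopA counts [0, 9, 18] m1)

-- ===== PORT B =====
def posSumB : List Int → Nat
  | [] => 0
  | c :: t => c.toNat + posSumB t

def seqOkB (c : Int) (rest : List Int) : Bool :=
  match rest with
  | r0 :: r1 :: _ => decide (0 < c) && decide (0 < r0) && decide (0 < r1)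
  | _ => false

def seqNextB (c : Int) (rest : List Int) : List Int :=
  match rest with
  | r0 :: r1 :: rest2 => (c - 1) :: (r0 - 1) :: (r1 - 1) :: rest2
  | _ => rest

def decomposeB : List Int → Bool
  | [] => true
  | c :: rest =>
    if c = 0 then decomposeB rest
    else if h3 : 3 ≤ c then
      if decomposeB ((c - 3) :: rest) then true
      else if hs : seqOkB c rest then decomposeB (seqNextB c rest) else false
    else if hs : seqOkB c rest then decomposeB (seqNextB c rest) else false
termination_by l => posSumB l + l.length
decreasing_by
  · simp [posSumB]; omega
  · simp [posSumB]; omega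
  · rcases rest with _ | ⟨r0, _ | ⟨r1, rest2⟩⟩ <;> simp [seqOkB] at hs
    simp [seqNextB, posSumB]; omega
  · rcases rest with _ | ⟨r0, _ | ⟨r1, rest2⟩⟩ <;> simp [seqOkB] at hs
    simp [seqNextB, posSumB]; omega

def can_form_melds_optimized_py_alt (counts : List Int) (num_melds : Int) : Bool :=
  if num_melds = 0 then counts.all (fun c => c == 0)
  else
    -- any(counts[i] % 3 != 0 for i in range(27, 34)); indices are in range wherever the
    -- generator is evaluated under Pre_, so counts.getD is exact there
    if (List.range' 27 7).any (fun i => PySem.Int.mod (counts.getD i 0) 3 ≠ 0) then false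
    else
      let melds := num_melds -
        ((List.range' 27 7).map (fun i => PySem.Int.floordiv (counts.getD i 0) 3)).sum
      if melds ≤ 0 then decide (melds = 0) && (PySem.List.slice counts none (some ((27 : Nat) : Int))).all (fun c => c == 0)
      else
        -- [[counts[s + k] for k in range(9)] for s in (0, 9, 18)]
        let suits := [(0 : Nat), 9, 18].map (fun (s : Nat) => (List.range' s 9).map (fun j => counts.getD j 0))
        if suits.any (fun su => PySem.Int.mod su.sum 3 ≠ 0) then false
        else if melds ≠ ((suits.filter (fun su => decide (0 < su.sum))).map (fun su => PySem.Int.floordiv su.sum 3)).sum then false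
        else suits.all (fun su => decide (su.sum ≤ 0) || decomposeB su)

-- ===== PRECONDITION & SPEC =====
-- Pre_: with num_melds ≠ 0, A raises IndexError while scanning counts[27..33] unless the
-- list has all 34 entries or the scan hits an honor count not divisible by 3 before running
-- off the end; exactly the raising inputs are excluded.
def Pre_can_form_melds_optimized_py (counts : List Int) (num_melds : Int) : Prop :=
  num_melds ≠ 0 → (34 ≤ counts.length ∨
    ∃ i ∈ List.range' 27 7, i < counts.length ∧ PySem.Int.mod (counts.getD i 0) 3 ≠ 0)
instance (counts : List Int) (num_melds : Int) : Decidable (Pre_can_form_melds_optimized_py counts num_melds) := by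
  unfold Pre_can_form_melds_optimized_py; infer_instance
def pvWitness_can_form_melds_optimized_py : List Int × Int :=
  ([0, 0, 0, 0, 0, 0, 0, 0, 0, 0, 0, 0, 0, 0, 0, 0, 0, 3, 3, 3, 0, 0, 0, 0, 0, 0, 0, 0, 0, 0, 0, 0, 0, 3], 4)

def Spec_can_form_melds_optimized_py (counts : List Int) (num_melds : Int) (out : Bool) : Prop := out = can_form_melds_optimized_py_alt counts num_melds
instance (counts : List Int) (num_melds : Int) (out : Bool) : Decidable (Spec_can_form_melds_optimized_py counts num_melds out) := by unfold Spec_can_form_melds_optimized_py; infer_instance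

-- ===== CLAIM =====
def Claim_equal_can_form_melds_optimized_py : Prop := ∀ (counts : List Int) (num_melds : Int), Dom_can_form_melds_optimized_py counts num_melds → Pre_can_form_melds_optimized_py counts num_melds → Spec_can_form_melds_optimized_py counts num_melds (can_form_melds_optimized_py counts num_melds)

-- ===== LEMMAS AND PROOFS =====

-- the window counts[i:e] read through getD (indices in range under the preconditions)
def windowW (c : List Int) (i e : Nat) : List Int :=
  (List.range' i (e - i)).map (fun j => c.getD j 0)

theorem windowW_cons (c : List Int) (i e : Nat) (h : i < e) :
    windowW c i e = c.getD i 0 :: windowW c (i + 1) e := by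
  unfold windowW
  have : e - i = (e - (i + 1)) + 1 := by omega
  rw [this, List.range'_succ]
  simp

theorem windowW_append (c : List Int) (i j e : Nat) (h1 : i ≤ j) (h2 : j ≤ e) :
    windowW c i e = windowW c i j ++ windowW c j e := by
  unfold windowW
  rw [← List.map_append]
  congr 1
  have h3 : e - i = (j - i) + (e - j) := by omega
  have h4 : i + (j - i) = j := by omega
  rw [h3, ← List.range'_append_1, h4]

theorem getD_set_ne (c : List Int) (j k : Nat) (v : Int) (h : j ≠ k) :
    (c.set j v).getD k 0 = c.getD k 0 := by
  simp [List.getD_eq_getElem?_getD, List.getElem?_set_ne h]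

theorem getD_set_self (c : List Int) (j : Nat) (v : Int) (h : j < c.length) :
    (c.set j v).getD j 0 = v := by
  simp [List.getD_eq_getElem?_getD, h]

theorem windowW_set_ne (c : List Int) (j : Nat) (v : Int) (i e : Nat) (h : j < i ∨ e ≤ j) :
    windowW (c.set j v) i e = windowW c i e := by
  unfold windowW
  apply List.map_congr_left
  intro k hk
  rw [List.mem_range'_1] at hk
  exact getD_set_ne c j k v (by omega)

theorem windowW_sum_zero (c : List Int) (s i : Nat)
    (hz : ∀ j, s ≤ j → j < i → c.getD j 0 = 0) : (windowW c s i).sum = 0 := by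
  apply List.sum_eq_zero
  intro x hx
  unfold windowW at hx
  rw [List.mem_map] at hx
  obtain ⟨j, hj, rfl⟩ := hx
  rw [List.mem_range'_1] at hj
  exact hz j hj.1 (by omega)

-- decomposeB: a leading zero is dropped
theorem decomposeB_zero_cons (l : List Int) : decomposeB (0 :: l) = decomposeB l := by
  rw [decomposeB]; simp

theorem decomposeB_zeros_append (z l : List Int) (hz : ∀ x ∈ z, x = 0) :
    decomposeB (z ++ l) = decomposeB l := by
  induction z with
  | nil => rfl
  | cons a t ih =>
    have ha : a = 0 := hz a (by simp)
    subst ha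
    rw [List.cons_append, decomposeB_zero_cons]
    exact ih (fun x hx => hz x (by simp [hx]))

theorem seqNextB_sum (c r0 r1 : Int) (rest2 : List Int) :
    (seqNextB c (r0 :: r1 :: rest2)).sum = (c :: r0 :: r1 :: rest2).sum - 3 := by
  simp [seqNextB]; ring

theorem decomposeB_neg_sum_aux : ∀ (n : Nat) (l : List Int), posSumB l + l.length ≤ n → l.sum < 0 → decomposeB l = false := by
  intro n
  induction n with
  | zero =>
    intro l hn h
    cases l with
    | nil => simp at h
    | cons c rest => simp [posSumB] at hn
  | succ n ih =>
    intro l hn h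
    cases l with
    | nil => simp at h
    | cons c rest =>
      by_cases hc : c = 0
      · subst hc
        rw [decomposeB_zero_cons]
        exact ih rest (by simp [posSumB] at hn ⊢; omega) (by simpa using h)
      · rw [decomposeB]
        simp only [hc, if_false]
        have hsl : (c :: rest).sum = c + rest.sum := by simp
        split
        · rename_i h3
          rw [ih ((c - 3) :: rest) (by simp [posSumB] at hn ⊢; omega)
                (by simp at h ⊢; omega)]
          simp only [Bool.false_eq_true, if_false]
          split
          · rename_i hs
            rcases rest with _ | ⟨r0, _ | ⟨r1, rest2⟩⟩ <;> simp [seqOkB] at hs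
            apply ih _ ?_ ?_
            · simp [seqNextB, posSumB] at hn ⊢; omega
            · rw [seqNextB_sum]; simp at h ⊢; omega
          · rfl
        · split
          · rename_i h3 hs
            rcases rest with _ | ⟨r0, _ | ⟨r1, rest2⟩⟩ <;> simp [seqOkB] at hs
            apply ih _ ?_ ?_
            · simp [seqNextB, posSumB] at hn ⊢; omega
            · rw [seqNextB_sum]; simp at h ⊢; omega
          · rfl

theorem decomposeB_neg_sum (l : List Int) (h : l.sum < 0) : decomposeB l = false :=
  decomposeB_neg_sum_aux (posSumB l + l.length) l le_rfl h

-- with zero sum, decomposing succeeds exactly on the all-zero list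
theorem decomposeB_sum_zero : ∀ (l : List Int), l.sum = 0 →
    decomposeB l = l.all (fun x => x == 0) := by
  intro l
  induction l with
  | nil => intro _; rw [decomposeB]; rfl
  | cons c rest ih =>
    intro h
    by_cases hc : c = 0
    · subst hc
      rw [decomposeB_zero_cons]
      simp only [List.all_cons, beq_self_eq_true, Bool.true_and]
      exact ih (by simpa using h)
    · have hall : (c :: rest).all (fun x => x == 0) = false := by simp [hc]
      rw [decomposeB, hall]
      simp only [hc, if_false]
      split
      · rename_i h3
        rw [decomposeB_neg_sum ((c - 3) :: rest) (by simp at h ⊢; omega)]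
        simp only [Bool.false_eq_true, if_false]
        split
        · rename_i hs
          rcases rest with _ | ⟨r0, _ | ⟨r1, rest2⟩⟩ <;> simp [seqOkB] at hs
          apply decomposeB_neg_sum
          rw [seqNextB_sum]; simp at h ⊢; omega
        · rfl
      · split
        · rename_i h3 hs
          rcases rest with _ | ⟨r0, _ | ⟨r1, rest2⟩⟩ <;> simp [seqOkB] at hs
          apply decomposeB_neg_sum
          rw [seqNextB_sum]; simp at h ⊢; omega
        · rfl

theorem windowW_length (c : List Int) (i e : Nat) : (windowW c i e).length = e - i := by
  simp [windowW]

theorem windowW_all (c : List Int) (s e : Nat) :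
    ((List.range' s (e - s)).all (fun i => c.getD i 0 == 0)) =
      ((windowW c s e).all (fun x => x == 0)) := by
  simp only [windowW, List.all_map]; rfl

theorem windowW_mem_zero (c : List Int) (s i : Nat)
    (hz : ∀ j, s ≤ j → j < i → c.getD j 0 = 0) : ∀ x ∈ windowW c s i, x = 0 := by
  intro x hx
  unfold windowW at hx
  rw [List.mem_map] at hx
  obtain ⟨j, hj, rfl⟩ := hx
  rw [List.mem_range'_1] at hj
  exact hz j hj.1 (by omega)

-- the loop invariant statement, indexed by an explicit bound on 10·fuel + remaining window
def LoopStmt (n : Nat) : Prop := ∀ (f : Nat) (counts : List Int) (s e : Nat) (r : Int) (i : Nat),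
  10 * f + (e - i) ≤ n → s % 9 = 0 → e = s + 9 → e ≤ counts.length → s ≤ i → i ≤ e →
  (∀ j, s ≤ j → j < i → counts.getD j 0 = 0) →
  (windowW counts s e).sum = 3 * r → 1 ≤ r → r.toNat ≤ f →
  solveLoopA f counts s e r i = decomposeB (windowW counts i e)

theorem suitEval (n : Nat) (ihn : LoopStmt n) (f : Nat) (counts : List Int) (s : Nat) (r : Int)
    (h9 : s % 9 = 0) (hlen : s + 9 ≤ counts.length)
    (hsum : (windowW counts s (s + 9)).sum = 3 * r) (hr0 : 0 ≤ r) (hrf : r.toNat < f)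
    (hfn : 10 * f ≤ n + 1) :
    solveSuitA f counts s (s + 9) r = decomposeB (windowW counts s (s + 9)) := by
  obtain ⟨f', rfl⟩ : ∃ f', f = f' + 1 := ⟨f - 1, by omega⟩
  rw [solveSuitA]
  by_cases hr : r = 0
  · subst hr
    rw [if_pos rfl, decomposeB_sum_zero _ (by rw [hsum]; ring), windowW_all]
  · rw [if_neg hr]
    exact ihn f' counts s (s + 9) r s (by omega) h9 rfl hlen le_rfl (by omega)
      (fun j h1 h2 => absurd h1 (by omega)) hsum (by omega) (by omega)

theorem loopAll : ∀ (n : Nat), LoopStmt n := by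
  intro n
  induction n with
  | zero =>
    intro f counts s e r i hn _ _ _ _ _ _ _ hr hf
    exfalso; omega
  | succ n ihn =>
    intro f counts s e r i hn h9 he hlen hsi hie hz hsum hr hf
    subst he
    by_cases hie' : i < s + 9
    case neg =>
      exfalso
      have hi : i = s + 9 := by omega
      subst hi
      rw [windowW_sum_zero counts s (s + 9) hz] at hsum
      omega
    case pos =>
      rw [solveLoopA, dif_pos hie']
      rw [windowW_cons counts i (s + 9) hie']
      have hilen : i < counts.length := by omega
      by_cases hc0 : counts.getD i 0 = 0
      · rw [if_pos hc0, hc0, decomposeB_zero_cons]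
        exact ihn f counts s (s + 9) r (i + 1) (by omega) h9 rfl hlen (by omega) (by omega)
          (fun j h1 h2 => by
            by_cases hji : j = i
            · subst hji; exact hc0
            · exact hz j h1 (by omega))
          hsum hr hf
      · -- first nonzero tile
        rw [if_neg hc0]
        set c := counts.getD i 0 with hcdef
        set w' := windowW counts (i + 1) (s + 9) with hw'
        -- decompose the sum: zeros ++ c :: w'
        have hsplit : windowW counts s (s + 9) = windowW counts s i ++ (c :: w') := by
          rw [windowW_append counts s i (s + 9) hsi (by omega),
            windowW_cons counts i (s + 9) hie']
        have hzsum : (windowW counts s i).sum = 0 := windowW_sum_zero counts s i hz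
        have hsum' : c + w'.sum = 3 * r := by
          rw [hsplit] at hsum; simp [hzsum] at hsum; omega
        have hzmem : ∀ x ∈ windowW counts s i, x = 0 := windowW_mem_zero counts s i hz
        -- (E1) the triplet try
        have ET : solveSuitA f (counts.set i (c - 3)) s (s + 9) (r - 1) =
            decomposeB ((c - 3) :: w') := by
          have hws : windowW (counts.set i (c - 3)) s (s + 9) =
              windowW counts s i ++ ((c - 3) :: w') := by
            rw [windowW_append _ s i (s + 9) hsi (by omega),
              windowW_set_ne counts i (c - 3) s i (Or.inr le_rfl),
              windowW_cons _ i (s + 9) hie', getD_set_self counts i (c - 3) hilen,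
              windowW_set_ne counts i (c - 3) (i + 1) (s + 9) (Or.inl (by omega))]
          rw [suitEval n ihn f (counts.set i (c - 3)) s (r - 1) h9 (by simpa using hlen)
              (by rw [hws]; simp [hzsum]; omega) (by omega) (by omega) (by omega)]
          rw [hws, decomposeB_zeros_append _ _ hzmem]
        -- (E2) the sequence try
        have ES : solveSeqA f counts s (s + 9) r i =
            (if _hs : seqOkB c w' = true then decomposeB (seqNextB c w') else false) := by
          rw [solveSeqA]
          by_cases h2 : i + 2 < s + 9
          · -- the window has at least two more tiles
            have h1 : i + 1 < s + 9 := by omega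
            set c1 := counts.getD (i + 1) 0 with hc1
            set c2 := counts.getD (i + 2) 0 with hc2
            have hw2 : w' = c1 :: c2 :: windowW counts (i + 3) (s + 9) := by
              rw [hw', windowW_cons counts (i + 1) (s + 9) h1,
                windowW_cons counts (i + 2) (s + 9) h2]
            by_cases hpos : 0 < c ∧ 0 < c1 ∧ 0 < c2
            · rw [if_pos (by exact ⟨by omega, h2, hpos.1, hpos.2.1, hpos.2.2⟩)]
              have hok : seqOkB c w' = true := by
                rw [hw2]; simp [seqOkB, hpos.1, hpos.2.1, hpos.2.2]
              rw [dif_pos hok]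
              set counts'' := ((counts.set i (c - 1)).set (i + 1) (c1 - 1)).set (i + 2) (c2 - 1) with hcc
              have hl1 : i + 1 < counts.length := by omega
              have hl2 : i + 2 < counts.length := by omega
              have hgi : counts''.getD i 0 = c - 1 := by
                rw [hcc, getD_set_ne _ (i + 2) i _ (by omega), getD_set_ne _ (i + 1) i _ (by omega),
                  getD_set_self counts i (c - 1) hilen]
              have hgi1 : counts''.getD (i + 1) 0 = c1 - 1 := by
                rw [hcc, getD_set_ne _ (i + 2) (i + 1) _ (by omega),
                  getD_set_self _ (i + 1) (c1 - 1) (by simpa using hl1)]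
              have hgi2 : counts''.getD (i + 2) 0 = c2 - 1 := by
                rw [hcc, getD_set_self _ (i + 2) (c2 - 1) (by simpa using hl2)]
              have hws : windowW counts'' s (s + 9) =
                  windowW counts s i ++ ((c - 1) :: (c1 - 1) :: (c2 - 1) :: windowW counts (i + 3) (s + 9)) := by
                rw [windowW_append _ s i (s + 9) hsi (by omega)]
                congr 1
                · rw [hcc, windowW_set_ne _ (i + 2) _ s i (Or.inr (by omega)),
                    windowW_set_ne _ (i + 1) _ s i (Or.inr (by omega)),
                    windowW_set_ne _ i _ s i (Or.inr le_rfl)]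
                · rw [windowW_cons _ i (s + 9) hie', hgi,
                    windowW_cons _ (i + 1) (s + 9) h1, hgi1,
                    windowW_cons _ (i + 2) (s + 9) h2, hgi2, hcc,
                    windowW_set_ne _ (i + 2) _ (i + 3) (s + 9) (Or.inl (by omega)),
                    windowW_set_ne _ (i + 1) _ (i + 3) (s + 9) (Or.inl (by omega)),
                    windowW_set_ne _ i _ (i + 3) (s + 9) (Or.inl (by omega))]
              have hsum3 : c1 + c2 + (windowW counts (i + 3) (s + 9)).sum + c = 3 * r := by
                rw [hw2] at hsum'; simp at hsum'; omega
              rw [suitEval n ihn f counts'' s (r - 1) h9 (by simp [hcc]; omega)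
                  (by rw [hws]; simp [hzsum]; omega) (by omega) (by omega) (by omega)]
              rw [hws, decomposeB_zeros_append _ _ hzmem, hw2]
              simp [seqNextB]
            · rw [if_neg (by intro hcond; exact hpos ⟨hcond.2.2.1, hcond.2.2.2⟩)]
              have hok : seqOkB c w' = false := by
                rw [hw2]; simp [seqOkB]; omega
              rw [dif_neg (by simp [hok])]
          · -- fewer than two tiles follow: neither side can form a run
            rw [if_neg (by
              intro hcond
              have hi9 : i % 9 = i - s := by omega
              omega)]
            have hlw : w'.length ≤ 1 := by rw [hw', windowW_length]; omega
            have hok : seqOkB c w' = false := by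
              rcases w' with _ | ⟨a, _ | ⟨b, t⟩⟩
              · rfl
              · rfl
              · simp at hlw
            rw [dif_neg (by simp [hok])]
        -- assemble both sides
        rw [decomposeB]
        rw [if_neg hc0, ET, ES]
        split
        · split <;> rfl
        · rfl

theorem suitFinal (counts : List Int) (s : Nat) (r : Int) (h9 : s % 9 = 0)
    (hlen : s + 9 ≤ counts.length) (hsum : (windowW counts s (s + 9)).sum = 3 * r) (hr : 0 < r) :
    solveSuitA (r.toNat + 1) counts s (s + 9) r = decomposeB (windowW counts s (s + 9)) :=
  suitEval (10 * (r.toNat + 1)) (loopAll _) _ counts s r h9 hlen hsum (by omega) (by omega)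
    (by omega)

theorem drop_take_window (c : List Int) (a k : Nat) (h : a + k ≤ c.length) :
    (c.drop a).take k = windowW c a (a + k) := by
  apply List.ext_getElem
  · rw [windowW_length]; simp; omega
  · intro n h1 h2
    rw [windowW_length] at h2
    simp only [windowW, List.getElem_take, List.getElem_drop, List.getElem_map,
      List.getElem_range'_1]
    rw [List.getD_eq_getElem c 0 (by omega)]

theorem slice_window (c : List Int) (a k : Nat) (h : a + k ≤ c.length) :
    PySem.List.slice c (some (a : Int)) (some ((a + k : Nat) : Int)) = windowW c a (a + k) := by
  rw [PySem.List.slice_natCast]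
  have : a + k - a = k := by omega
  rw [this]
  exact drop_take_window c a k h

theorem honorsChar : ∀ (is : List Nat) (counts : List Int) (m : Int),
    honorsLoopA counts is m =
      (if (is.map (fun i => counts.getD i 0)).any (fun c => PySem.Int.mod c 3 ≠ 0) then none
       else some (m - ((is.map (fun i => counts.getD i 0)).map
           (fun c => PySem.Int.floordiv c 3)).sum)) := by
  intro is
  induction is with
  | nil => intro counts m; simp [honorsLoopA]
  | cons i it ih =>
    intro counts m
    rw [honorsLoopA]
    simp only [List.map_cons, List.any_cons, List.sum_cons]
    by_cases hm : PySem.Int.mod (counts.getD i 0) 3 ≠ 0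
    · rw [if_pos hm, if_pos (by rw [decide_eq_true hm, Bool.true_or])]
    · rw [if_neg hm, ih]
      cases ha : ((it.map (fun j => counts.getD j 0)).any fun c => decide (PySem.Int.mod c 3 ≠ 0)) with
      | true =>
        rw [if_pos rfl, if_pos (by rw [Bool.or_true])]
      | false =>
        rw [if_neg (by exact Bool.false_ne_true),
          if_neg (by rw [decide_eq_false hm, Bool.or_false]; exact Bool.false_ne_true)]
        congr 1
        ring

-- per-suit tile sum and meld count, as the ports spell them
def tS (counts : List Int) (s : Nat) : Int :=
  (PySem.List.slice counts (some (s : Int)) (some ((s + 9 : Nat) : Int))).sum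

def smS (counts : List Int) (s : Nat) : Int := PySem.Int.floordiv (tS counts s) 3

def fsumA (counts : List Int) (ss : List Nat) : Int :=
  ((ss.filter fun s => decide (0 < smS counts s)).map fun s => smS counts s).sum

theorem tS_fold (counts : List Int) (s : Nat) :
    (PySem.List.slice counts (some (s : Int)) (some ((s + 9 : Nat) : Int))).sum = tS counts s := rfl

theorem smS_fold (counts : List Int) (s : Nat) :
    PySem.Int.floordiv (tS counts s) 3 = smS counts s := rfl

theorem capA : ∀ (ss : List Nat) (counts : List Int) (m : Int),
    suitsLoopA counts ss m = true ↔
      ((∀ s ∈ ss, PySem.Int.mod (tS counts s) 3 = 0) ∧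
       (∀ s ∈ ss, 0 < smS counts s →
          solveSuitA ((smS counts s).toNat + 1) counts s (s + 9) (smS counts s) = true) ∧
       m = fsumA counts ss) := by
  intro ss
  induction ss with
  | nil =>
    intro counts m
    simp [suitsLoopA, fsumA]
  | cons s ss ih =>
    intro counts m
    rw [suitsLoopA]
    rw [tS_fold, smS_fold]
    by_cases hmod : PySem.Int.mod (tS counts s) 3 ≠ 0
    · rw [if_pos hmod]
      simp only [Bool.false_eq_true, false_iff]
      rintro ⟨h1, -, -⟩
      exact hmod (h1 s (by simp))
    · rw [if_neg hmod]
      have hmod' : PySem.Int.mod (tS counts s) 3 = 0 := by omega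
      have hfs : ∀ b : Bool, fsumA counts (s :: ss) =
          (if 0 < smS counts s then smS counts s + fsumA counts ss else fsumA counts ss) := by
        intro _
        unfold fsumA
        rw [List.filter_cons]
        by_cases hsm : 0 < smS counts s
        · rw [if_pos hsm, if_pos (decide_eq_true hsm), List.map_cons, List.sum_cons]
        · rw [if_neg hsm, if_neg (by rw [decide_eq_false hsm]; exact Bool.false_ne_true)]
      by_cases hsm : 0 < smS counts s
      · rw [if_pos hsm]
        cases hsv : solveSuitA ((smS counts s).toNat + 1) counts s (s + 9) (smS counts s) with
        | false =>
          simp only [Bool.false_eq_true, if_false, false_iff]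
          rintro ⟨-, h2, -⟩
          rw [h2 s (by simp) hsm] at hsv
          exact absurd hsv (by decide)
        | true =>
          rw [if_pos rfl, ih]
          rw [hfs true, if_pos hsm]
          constructor
          · rintro ⟨h1, h2, h3⟩
            refine ⟨?_, ?_, by omega⟩
            · intro u hu
              rcases List.mem_cons.mp hu with rfl | hu
              · exact hmod'
              · exact h1 u hu
            · intro u hu husm
              rcases List.mem_cons.mp hu with rfl | hu
              · exact hsv
              · exact h2 u hu husm
          · rintro ⟨h1, h2, h3⟩
            exact ⟨fun u hu => h1 u (by simp [hu]), fun u hu husm => h2 u (by simp [hu]) husm,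
              by omega⟩
      · rw [if_neg hsm, ih]
        rw [hfs true, if_neg hsm]
        constructor
        · rintro ⟨h1, h2, h3⟩
          refine ⟨?_, ?_, h3⟩
          · intro u hu
            rcases List.mem_cons.mp hu with rfl | hu
            · exact hmod'
            · exact h1 u hu
          · intro u hu husm
            rcases List.mem_cons.mp hu with rfl | hu
            · exact absurd husm hsm
            · exact h2 u hu husm
        · rintro ⟨h1, h2, h3⟩
          exact ⟨fun u hu => h1 u (by simp [hu]), fun u hu husm => h2 u (by simp [hu]) husm, h3⟩

theorem tS_eq_3_smS (counts : List Int) (s : Nat) (hmod : PySem.Int.mod (tS counts s) 3 = 0) :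
    tS counts s = 3 * smS counts s := by
  have h := PySem.Int.floordiv_mul_add_mod (tS counts s) 3
  unfold smS
  omega

theorem slice_sum_windowW (counts : List Int) (s : Nat) (hl : s + 9 ≤ counts.length) :
    PySem.List.slice counts (some (s : Int)) (some ((s + 9 : Nat) : Int)) =
      windowW counts s (s + 9) := slice_window counts s 9 hl

theorem perSuit (counts : List Int) (s : Nat) (h9 : s % 9 = 0) (hl : s + 9 ≤ counts.length)
    (hmod : PySem.Int.mod (tS counts s) 3 = 0) :
    ((0 < smS counts s →
        solveSuitA ((smS counts s).toNat + 1) counts s (s + 9) (smS counts s) = true)) ↔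
      (tS counts s ≤ 0 ∨ decomposeB (windowW counts s (s + 9)) = true) := by
  have ht := tS_eq_3_smS counts s hmod
  by_cases hpos : 0 < smS counts s
  · have hsolve : solveSuitA ((smS counts s).toNat + 1) counts s (s + 9) (smS counts s) =
        decomposeB (windowW counts s (s + 9)) := by
      apply suitFinal counts s (smS counts s) h9 hl ?_ hpos
      rw [← slice_sum_windowW counts s hl, tS_fold, ht]
    rw [hsolve]
    constructor
    · intro h; exact Or.inr (h hpos)
    · rintro (h | h)
      · omega
      · intro _; exact h
  · constructor
    · intro _; exact Or.inl (by omega)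
    · intro _ h; exact absurd h hpos

theorem fsumA_cons (counts : List Int) (s : Nat) (ss : List Nat) :
    fsumA counts (s :: ss) =
      if 0 < smS counts s then smS counts s + fsumA counts ss else fsumA counts ss := by
  unfold fsumA
  rw [List.filter_cons]
  by_cases hsm : 0 < smS counts s
  · rw [if_pos hsm, if_pos (decide_eq_true hsm), List.map_cons, List.sum_cons]
  · rw [if_neg hsm, if_neg (by rw [decide_eq_false hsm]; exact Bool.false_ne_true)]

theorem wF_fold (counts : List Int) (s : Nat) :
    (List.range' s 9).map (fun j => counts.getD j 0) = windowW counts s (s + 9) := by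
  unfold windowW
  rw [Nat.add_sub_cancel_left]

theorem wsum_tS (counts : List Int) (s : Nat) (hl : s + 9 ≤ counts.length) :
    (windowW counts s (s + 9)).sum = tS counts s := by
  rw [← slice_sum_windowW counts s hl]
  exact tS_fold counts s

theorem fsum_eq : ∀ (ss : List Nat) (counts : List Int),
    (∀ s ∈ ss, s + 9 ≤ counts.length) →
    (∀ s ∈ ss, PySem.Int.mod (tS counts s) 3 = 0) →
    ((((ss.map (fun (s : Nat) => windowW counts s (s + 9))).filter
        (fun su => decide (0 < su.sum))).map (fun su => PySem.Int.floordiv su.sum 3)).sum) =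
      fsumA counts ss := by
  intro ss
  induction ss with
  | nil => intro counts _ _; simp [fsumA]
  | cons s ss ih =>
    intro counts hls h
    have hmod := h s (by simp)
    have ht := tS_eq_3_smS counts s hmod
    have hw := wsum_tS counts s (hls s (by simp))
    rw [List.map_cons, List.filter_cons, fsumA_cons]
    by_cases hsm : 0 < smS counts s
    · rw [if_pos hsm, if_pos (by rw [hw]; exact decide_eq_true (by omega)),
        List.map_cons, List.sum_cons, hw, smS_fold,
        ih counts (fun u hu => hls u (by simp [hu])) (fun u hu => h u (by simp [hu]))]
    · have hc : decide (0 < (windowW counts s (s + 9)).sum) = false := by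
        rw [hw]
        exact decide_eq_false (by omega)
      rw [if_neg hsm, if_neg (by rw [hc]; exact Bool.false_ne_true),
        ih counts (fun u hu => hls u (by simp [hu])) (fun u hu => h u (by simp [hu]))]

theorem tailEq (ss : List Nat) (counts : List Int) (m1 : Int)
    (hss : ∀ s ∈ ss, s % 9 = 0 ∧ s + 9 ≤ counts.length) :
    suitsLoopA counts ss m1 =
      (if (ss.map (fun (s : Nat) => (List.range' s 9).map (fun j => counts.getD j 0))).any (fun su => PySem.Int.mod su.sum 3 ≠ 0)
        then false
       else if m1 ≠ ((((ss.map (fun (s : Nat) => (List.range' s 9).map (fun j => counts.getD j 0))).filter (fun su => decide (0 < su.sum))).map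
              (fun su => PySem.Int.floordiv su.sum 3)).sum) then false
       else (ss.map (fun (s : Nat) => (List.range' s 9).map (fun j => counts.getD j 0))).all
          (fun su => decide (su.sum ≤ 0) || decomposeB su)) := by
  have hF : (fun (s : Nat) => (List.range' s 9).map (fun j => counts.getD j 0)) = (fun (s : Nat) => windowW counts s (s + 9)) :=
    funext (fun s => wF_fold counts s)
  rw [hF]
  have hws : ∀ s ∈ ss, (windowW counts s (s + 9)).sum = tS counts s :=
    fun s hs => wsum_tS counts s (hss s hs).2
  apply Bool.coe_iff_coe.mp
  rw [capA]
  by_cases hany : ((ss.map (fun (s : Nat) => windowW counts s (s + 9))).any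
      (fun su => decide (PySem.Int.mod su.sum 3 ≠ 0))) = true
  · rw [if_pos hany]
    apply iff_of_false ?_ (by simp)
    rintro ⟨h1, -, -⟩
    rw [List.any_map, List.any_eq_true] at hany
    obtain ⟨s, hs, hdec⟩ := hany
    simp only [Function.comp_apply, decide_eq_true_eq] at hdec
    rw [hws s hs] at hdec
    exact hdec (h1 s hs)
  · rw [if_neg hany]
    have hmods : ∀ s ∈ ss, PySem.Int.mod (tS counts s) 3 = 0 := by
      intro s hsm
      by_contra hne
      apply hany
      rw [List.any_map, List.any_eq_true]
      refine ⟨s, hsm, ?_⟩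
      simp only [Function.comp_apply]
      rw [hws s hsm]
      exact decide_eq_true hne
    rw [fsum_eq ss counts (fun s hs => (hss s hs).2) hmods]
    by_cases hfs : m1 = fsumA counts ss
    · rw [if_neg (show ¬(m1 ≠ fsumA counts ss) from fun h => h hfs)]
      constructor
      · rintro ⟨-, h2, -⟩
        rw [List.all_map, List.all_eq_true]
        intro s hs
        have hps := (perSuit counts s (hss s hs).1 (hss s hs).2 (hmods s hs)).mp
          (fun hp => h2 s hs hp)
        show (decide ((windowW counts s (s + 9)).sum ≤ 0) || decomposeB (windowW counts s (s + 9))) = true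
        rw [Bool.or_eq_true]
        rcases hps with h | h
        · exact Or.inl (by rw [hws s hs]; exact decide_eq_true h)
        · exact Or.inr h
      · intro hall
        refine ⟨hmods, ?_, hfs⟩
        intro s hs hpos
        apply (perSuit counts s (hss s hs).1 (hss s hs).2 (hmods s hs)).mpr ?_ hpos
        rw [List.all_map, List.all_eq_true] at hall
        have := hall s hs
        simp only [Function.comp_apply, Bool.or_eq_true, decide_eq_true_eq] at this
        rcases this with h | h
        · rw [hws s hs] at h
          exact Or.inl h
        · exact Or.inr h
    · rw [if_pos hfs]
      apply iff_of_false ?_ (by simp)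
      rintro ⟨-, -, h3⟩
      exact hfs h3

theorem range'_27_7 : List.range' 27 7 = [27, 28, 29, 30, 31, 32, 33] := rfl

theorem any_honors (counts : List Int) :
    (([27, 28, 29, 30, 31, 32, 33].map (fun i => counts.getD i 0)).any
        (fun c => PySem.Int.mod c 3 ≠ 0)) =
      ((List.range' 27 7).any (fun i => PySem.Int.mod (counts.getD i 0) 3 ≠ 0)) := by
  rw [← range'_27_7, List.any_map]
  rfl

theorem sum_honors (counts : List Int) :
    (([27, 28, 29, 30, 31, 32, 33].map (fun i => counts.getD i 0)).map
        (fun c => PySem.Int.floordiv c 3)).sum =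
      ((List.range' 27 7).map (fun i => PySem.Int.floordiv (counts.getD i 0) 3)).sum := by
  rw [← range'_27_7, List.map_map]
  rfl

theorem main_equiv (counts : List Int) (num_melds : Int)
    (hpre : Pre_can_form_melds_optimized_py counts num_melds) :
    can_form_melds_optimized_py counts num_melds =
      can_form_melds_optimized_py_alt counts num_melds := by
  rw [can_form_melds_optimized_py, can_form_melds_optimized_py_alt]
  by_cases hm : num_melds = 0
  · rw [if_pos hm, if_pos hm]
  · rw [if_neg hm, if_neg hm]
    rw [honorsChar, any_honors]
    cases hany : ((List.range' 27 7).any fun i =>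
        decide (PySem.Int.mod (counts.getD i 0) 3 ≠ 0)) with
    | true => rw [if_pos rfl, if_pos rfl, Option.elim_none]
    | false =>
      -- the honors scan completed, so all 34 entries exist
      have hlen : 34 ≤ counts.length := by
        rcases hpre hm with h | ⟨i, hi, -, hbad⟩
        · exact h
        · exfalso
          have : ((List.range' 27 7).any fun i =>
              decide (PySem.Int.mod (counts.getD i 0) 3 ≠ 0)) = true :=
            List.any_eq_true.mpr ⟨i, hi, decide_eq_true hbad⟩
          rw [hany] at this
          exact Bool.false_ne_true this
      rw [if_neg (by exact Bool.false_ne_true), if_neg (by exact Bool.false_ne_true)]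
      simp only [Option.elim_some, sum_honors]
      by_cases hm1 : num_melds - ((List.range' 27 7).map fun i =>
          PySem.Int.floordiv (counts.getD i 0) 3).sum ≤ 0
      · rw [if_pos hm1, if_pos hm1]
      · rw [if_neg hm1, if_neg hm1]
        exact tailEq [0, 9, 18] counts _ (by
          intro s hs
          simp only [List.mem_cons, List.not_mem_nil, or_false] at hs
          rcases hs with rfl | rfl | rfl <;> exact ⟨by norm_num, by omega⟩)

-- ===== VERDICT (by name: the statement is the Claim_ definition above) =====
theorem can_form_melds_optimized_py_spec : Claim_equal_can_form_melds_optimized_py := by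
  intro counts num_melds _ hpre
  exact main_equiv counts num_melds hpre
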